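-- pv_equiv track=rewrite | github.com/chupinana04/Python-PTIT | CodePTIT/PY01011.py | check
-- ===== SOURCE A (Python) =====
-- def check(s):
--     s = str(s)
--     if len(s) % 2 == 1: return False
--     for i in range(len(s)):
--         if s[i] != '0' and s[i] != '2' and s[i] != '4' and s[i] != '6' and s[i] != '8':
--             return False
--     res = s[::-1];
--     if res != s: return False
--     return True
-- ===== SOURCE B (Python) =====
-- def check(s):
--     s = str(s)
--     n = len(s)
--     if n % 2 == 1:
--         return False
--     for i in range(n // 2):
--         j = n - 1 - i
--         if s[i] != s[j] or s[i] not in '02468':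
--             return False
--     return True
-- ===== Notes on version B (the rewrite author's own statement) =====
-- stated objective: alternative
-- what changed: Replaces the full even-digit scan plus reverse-and-compare with a single fused half-length two-pointer pass that checks the palindrome pairing and even-digit membership together.
import Mathlib
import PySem

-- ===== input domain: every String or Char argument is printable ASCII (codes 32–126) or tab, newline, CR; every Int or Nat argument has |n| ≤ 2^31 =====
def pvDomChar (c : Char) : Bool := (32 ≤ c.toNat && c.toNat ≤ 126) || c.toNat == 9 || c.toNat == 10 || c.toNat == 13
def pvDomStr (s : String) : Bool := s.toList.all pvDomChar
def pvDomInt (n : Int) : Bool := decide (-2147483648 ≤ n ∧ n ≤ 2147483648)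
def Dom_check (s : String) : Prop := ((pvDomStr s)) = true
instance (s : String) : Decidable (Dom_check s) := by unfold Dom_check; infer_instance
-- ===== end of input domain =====

-- B fuses the even-digit scan and the reverse-and-compare palindrome check into one half-length two-pointer pass.


-- ===== PORT A =====
-- A's for-loop over range(len(s)) reading s[i] in order, with its early return False
def allEvenA : List Char → Bool
  | [] => true
  | c :: rest =>
    if c != '0' && c != '2' && c != '4' && c != '6' && c != '8' then false
    else allEvenA rest

def check (s : String) : Bool :=
  let cs := s.toList
  if cs.length % 2 == 1 then false
  else if !(allEvenA cs) then false
  else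
    let res := cs.reverse      -- s[::-1]
    if res != cs then false else true

-- ===== PORT B =====
-- B's loop: for i in range(n // 2), j = n - 1 - i; the fuel argument counts the remaining iterations
def evloop (cs : List Char) (i : Nat) : Nat → Bool
  | 0 => true
  | k + 1 =>
    let a := cs.getD i ' '                       -- s[i], index provably in range
    let b := cs.getD (cs.length - 1 - i) ' '     -- s[j]
    if a != b || !(['0','2','4','6','8'].contains a) then false
    else evloop cs (i + 1) k

def check_alt (s : String) : Bool :=
  let cs := s.toList
  if cs.length % 2 == 1 then false
  else evloop cs 0 (cs.length / 2)

-- ===== PRECONDITION & SPEC =====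
def Spec_check (s : String) (out : Bool) : Prop := out = check_alt s
instance (s : String) (out : Bool) : Decidable (Spec_check s out) := by unfold Spec_check; infer_instance

-- ===== CLAIM (what is proved, stated in full; the proofs are below) =====
def Claim_equal_check : Prop := ∀ (s : String), Dom_check s → Spec_check s (check s)

-- ===== LEMMAS AND PROOFS =====

def ev (c : Char) : Bool := ['0','2','4','6','8'].contains c

lemma evloop_succ (cs : List Char) (i k : Nat) : evloop cs i (k + 1) =
    if cs.getD i ' ' != cs.getD (cs.length - 1 - i) ' '
        || !(['0','2','4','6','8'].contains (cs.getD i ' ')) then false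
    else evloop cs (i + 1) k := rfl

lemma cond_eq_not_ev (c : Char) :
    (c != '0' && c != '2' && c != '4' && c != '6' && c != '8') = !(ev c) := by
  show _ = !(['0','2','4','6','8'].contains c)
  cases h0 : c == '0' <;> cases h2 : c == '2' <;> cases h4 : c == '4' <;>
    cases h6 : c == '6' <;> cases h8 : c == '8' <;>
  simp only [List.contains_cons, List.contains_nil, bne, h0, h2, h4, h6, h8,
    Bool.or_false, Bool.or_true, Bool.true_or, Bool.false_or, Bool.not_true, Bool.not_false,
    Bool.and_true, Bool.and_false, Bool.true_and, Bool.false_and]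

lemma allEvenA_mem (cs : List Char) : allEvenA cs = true ↔ ∀ c ∈ cs, ev c = true := by
  induction cs with
  | nil => simp [allEvenA]
  | cons c rest ih =>
    rw [allEvenA, cond_eq_not_ev]
    cases h : ev c
    · simp only [h, Bool.not_false, if_true]
      constructor
      · intro hf; exact absurd hf (by simp)
      · intro hall; exact absurd (hall c (by simp)) (by simp [h])
    · simp only [h, Bool.not_true, Bool.false_eq_true, if_false, ih]
      constructor
      · intro hall d hd
        rcases List.mem_cons.mp hd with rfl | hd
        · exact h
        · exact hall d hd
      · intro hall d hd; exact hall d (List.mem_cons_of_mem _ hd)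

lemma allEvenA_iff (cs : List Char) :
    allEvenA cs = true ↔ ∀ i < cs.length, ev (cs.getD i ' ') = true := by
  rw [allEvenA_mem]
  constructor
  · intro h i hi
    rw [List.getD_eq_getElem _ _ hi]
    exact h _ (List.getElem_mem _)
  · intro h c hc
    obtain ⟨i, hi, rfl⟩ := List.mem_iff_getElem.mp hc
    rw [← List.getD_eq_getElem _ (' ') hi]
    exact h i hi

lemma evloop_iff (cs : List Char) : ∀ k i, evloop cs i k = true ↔
    ∀ t, t < k → (cs.getD (i + t) ' ' = cs.getD (cs.length - 1 - (i + t)) ' '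
      ∧ ev (cs.getD (i + t) ' ') = true) := by
  intro k
  induction k with
  | zero => intro i; simp [evloop]
  | succ k ih =>
    intro i
    rw [evloop_succ]
    by_cases hbad : (cs.getD i ' ' != cs.getD (cs.length - 1 - i) ' '
        || !(['0','2','4','6','8'].contains (cs.getD i ' '))) = true
    · rw [if_pos hbad]
      simp only [Bool.false_eq_true, false_iff]
      intro hcon
      have h0 := hcon 0 (Nat.succ_pos k)
      simp only [Nat.add_zero] at h0
      simp only [Bool.or_eq_true, bne_iff_ne, Bool.not_eq_true'] at hbad
      rcases hbad with hb | hb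
      · exact hb h0.1
      · have := h0.2; simp only [ev] at this; rw [this] at hb; exact absurd hb (by decide)
    · rw [if_neg hbad, ih]
      simp only [Bool.or_eq_true, bne_iff_ne, Bool.not_eq_true', not_or, not_not,
        Bool.not_eq_false] at hbad
      constructor
      · intro h t ht
        cases t with
        | zero =>
          simp only [Nat.add_zero]
          exact ⟨hbad.1, by simp only [ev]; exact hbad.2⟩
        | succ t =>
          have := h t (by omega)
          have harr : i + 1 + t = i + (t + 1) := by omega
          rwa [harr] at this
      · intro h t ht
        have := h (t + 1) (by omega)
        have harr : i + (t + 1) = i + 1 + t := by omega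
        rwa [harr] at this

lemma reverse_eq_iff (cs : List Char) :
    cs.reverse = cs ↔ ∀ i < cs.length, cs.getD i ' ' = cs.getD (cs.length - 1 - i) ' ' := by
  constructor
  · intro hrev i hi
    have h' : i < cs.reverse.length := by simpa using hi
    have h1 : cs.reverse[i] = cs[i] := List.getElem_of_eq hrev h'
    rw [List.getElem_reverse] at h1
    have hlt : cs.length - 1 - i < cs.length := by omega
    rw [List.getD_eq_getElem _ _ hi, List.getD_eq_getElem _ _ hlt]
    exact h1.symm
  · intro h
    apply List.ext_getElem (by simp)
    intro i h1 h2
    rw [List.getElem_reverse]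
    have hlt : cs.length - 1 - i < cs.length := by omega
    have := h i h2
    rw [List.getD_eq_getElem _ _ h2, List.getD_eq_getElem _ _ hlt] at this
    exact this.symm

lemma key (cs : List Char) (hev : cs.length % 2 = 0) :
    (allEvenA cs && (cs.reverse == cs)) = evloop cs 0 (cs.length / 2) := by
  rw [Bool.eq_iff_iff]
  simp only [Bool.and_eq_true, beq_iff_eq, allEvenA_iff, evloop_iff, Nat.zero_add,
    reverse_eq_iff]
  constructor
  · intro ⟨hall, hpal⟩ t ht
    have htn : t < cs.length := by omega
    exact ⟨hpal t htn, hall t htn⟩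
  · intro h
    have hpal : ∀ i < cs.length, cs.getD i ' ' = cs.getD (cs.length - 1 - i) ' ' := by
      intro i hi
      by_cases hhalf : i < cs.length / 2
      · exact (h i hhalf).1
      · set j := cs.length - 1 - i with hj
        have hjh : j < cs.length / 2 := by omega
        have hji := (h j hjh).1
        have hij : cs.length - 1 - j = i := by omega
        rw [hij] at hji
        exact hji.symm
    refine ⟨?_, hpal⟩
    intro i hi
    by_cases hhalf : i < cs.length / 2
    · exact (h i hhalf).2
    · set j := cs.length - 1 - i with hj
      have hjh : j < cs.length / 2 := by omega
      have h2 := (h j hjh).2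
      have hpj := hpal j (by omega)
      have hij : cs.length - 1 - j = i := by omega
      rw [hij] at hpj
      rw [← hpj]
      exact h2

-- ===== VERDICT (by name: the statement is the Claim_ definition above) =====
theorem check_spec : Claim_equal_check := by
  intro s _
  unfold Spec_check check check_alt
  set cs := s.toList with hcs
  by_cases hodd : cs.length % 2 = 1
  · simp [hodd]
  · have hev : cs.length % 2 = 0 := by omega
    have hne : (cs.length % 2 == 1) = false := by simp [hev]
    simp only [hne, Bool.false_eq_true, if_false]
    rw [← key cs hev]
    by_cases ha : allEvenA cs = true
    · by_cases hp : cs.reverse = cs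
      · simp [ha, hp]
      · simp [ha, hp]
    · simp only [Bool.not_eq_true] at ha
      simp [ha]
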